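-- pv_equiv track=rewrite | github.com/k-acdm/mykt-eitango | scripts/generate_kiso_questions/rank_20_integer_mixed.py | _resolve_band_c_subkind
-- ===== SOURCE A (Python) =====
-- from typing import Any, Dict, List, Optional, Tuple
--
-- def _resolve_band_c_subkind(slot_index: int, subcounts: Dict[str, int]) -> str:
--     """Band C: slot_index → "plus_dom" / "minus_dom" / "mul_dom"。"""
--     cumulative = 0
--     for subkind in ("plus_dom", "minus_dom", "mul_dom"):
--         c = subcounts.get(subkind, 0)
--         if c == 0:
--             continue
--         if slot_index < cumulative + c:
--             return subkind
--         cumulative += c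
--     return "mul_dom"
-- ===== SOURCE B (Python) =====
-- def _resolve_band_c_subkind(slot_index: int, subcounts: dict) -> str:
--     """Band C: slot_index -> "plus_dom" / "minus_dom" / "mul_dom".
--
--     Prefix-threshold table + binary search: collect, in the fixed order,
--     each nonzero bucket's name together with the running cumulative total,
--     then bisect_right (first threshold strictly greater than slot_index)
--     locates the bucket; at or past the last threshold the answer is the
--     default "mul_dom".
--     """
--     names = []
--     thresholds = []
--     total = 0
--     for subkind in ("plus_dom", "minus_dom", "mul_dom"):
--         c = subcounts.get(subkind, 0)
--         if c == 0:
--             continue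
--         total += c
--         names.append(subkind)
--         thresholds.append(total)
--     # hand-rolled bisect_right (A imports no stdlib modules we could reuse)
--     lo, hi = 0, len(thresholds)
--     while lo < hi:
--         mid = (lo + hi) // 2
--         if thresholds[mid] <= slot_index:
--             lo = mid + 1
--         else:
--             hi = mid
--     return names[lo] if lo < len(names) else "mul_dom"
-- ===== Notes on version B (the rewrite author's own statement) =====
-- stated objective: alternative
-- what changed: Replaces A's incremental cumulative scan with early return by a staged index-then-search design: first build a prefix-threshold table (name and running cumulative total for each nonzero bucket, in the fixed order), then bisect_right (hand-rolled binary search, first threshold strictly greater than slot_index) picks the bucket, defaulting to 'mul_dom' at or past the last threshold.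
-- outside the precondition, e.g. on _resolve_band_c_subkind(0, {'plus_dom': 5, 'minus_dom': -10}): A returns 'plus_dom', B returns 'mul_dom'
import Mathlib
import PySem

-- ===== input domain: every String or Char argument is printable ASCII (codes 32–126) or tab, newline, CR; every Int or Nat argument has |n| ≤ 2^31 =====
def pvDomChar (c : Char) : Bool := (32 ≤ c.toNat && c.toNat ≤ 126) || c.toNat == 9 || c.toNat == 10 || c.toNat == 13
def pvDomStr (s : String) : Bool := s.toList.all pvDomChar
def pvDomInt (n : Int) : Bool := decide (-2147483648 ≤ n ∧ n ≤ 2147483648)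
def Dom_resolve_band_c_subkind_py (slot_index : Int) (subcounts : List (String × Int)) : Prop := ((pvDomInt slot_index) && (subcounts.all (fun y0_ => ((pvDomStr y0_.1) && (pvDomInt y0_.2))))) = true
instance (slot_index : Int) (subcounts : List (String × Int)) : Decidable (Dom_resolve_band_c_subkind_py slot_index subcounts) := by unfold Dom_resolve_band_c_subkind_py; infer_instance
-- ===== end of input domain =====

-- B builds a prefix-threshold table of the nonzero buckets and binary-searches it
-- (bisect_right) instead of A's incremental cumulative scan — objective: alternative.

-- ===== PORT A =====
-- the for-loop with its `cumulative` accumulator and early `return`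
def pvALoop (slot_index : Int) (subcounts : List (String × Int)) : List String → Int → String
  | [], _ => "mul_dom"
  | subkind :: rest, cumulative =>
    let c := PySem.Dict.getD (PySem.Dict.mk subcounts) subkind 0
    if c == 0 then pvALoop slot_index subcounts rest cumulative
    else if slot_index < cumulative + c then subkind
    else pvALoop slot_index subcounts rest (cumulative + c)

def resolve_band_c_subkind_py (slot_index : Int) (subcounts : List (String × Int)) : String :=
  pvALoop slot_index subcounts ["plus_dom", "minus_dom", "mul_dom"] 0

-- ===== PORT B =====
-- the table-building loop: (names, thresholds, total) accumulator
def pvBuildLoop (subcounts : List (String × Int)) : List String → List String × List Int × Int → List String × List Int × Int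
  | [], st => st
  | subkind :: rest, (names, thresholds, total) =>
    let c := PySem.Dict.getD (PySem.Dict.mk subcounts) subkind 0
    if c == 0 then pvBuildLoop subcounts rest (names, thresholds, total)
    else pvBuildLoop subcounts rest (names ++ [subkind], thresholds ++ [total + c], total + c)

-- the hand-rolled bisect_right while-loop (lo, hi as Nat indices)
def pvBisect (thresholds : List Int) (x : Int) (lo hi : Nat) : Nat :=
  if _h : lo < hi then
    let mid := (lo + hi) / 2
    if thresholds.getD mid 0 ≤ x then pvBisect thresholds x (mid + 1) hi
    else pvBisect thresholds x lo mid
  else lo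
termination_by hi - lo
decreasing_by all_goals omega

def resolve_band_c_subkind_py_alt (slot_index : Int) (subcounts : List (String × Int)) : String :=
  let st := pvBuildLoop subcounts ["plus_dom", "minus_dom", "mul_dom"] ([], [], 0)
  let names := st.1
  let thresholds := st.2.1
  let lo := pvBisect thresholds slot_index 0 thresholds.length
  if lo < names.length then names.getD lo "mul_dom" else "mul_dom"

-- ===== PRECONDITION & SPEC =====
-- Pre_ excludes dicts giving any of the three buckets a NEGATIVE count: there the
-- prefix thresholds are not sorted, so A's sequential scan and B's binary search are
-- both accidental behaviours no caller would specify (counts are counts).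
def Pre_resolve_band_c_subkind_py (slot_index : Int) (subcounts : List (String × Int)) : Prop :=
  0 ≤ PySem.Dict.getD (PySem.Dict.mk subcounts) "plus_dom" 0 ∧
  0 ≤ PySem.Dict.getD (PySem.Dict.mk subcounts) "minus_dom" 0 ∧
  0 ≤ PySem.Dict.getD (PySem.Dict.mk subcounts) "mul_dom" 0
instance (slot_index : Int) (subcounts : List (String × Int)) : Decidable (Pre_resolve_band_c_subkind_py slot_index subcounts) := by unfold Pre_resolve_band_c_subkind_py; infer_instance

def pvWitness_resolve_band_c_subkind_py : Int × (List (String × Int)) := (3, [("plus_dom", 2), ("minus_dom", 4)])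

def Spec_resolve_band_c_subkind_py (slot_index : Int) (subcounts : List (String × Int)) (out : String) : Prop := out = resolve_band_c_subkind_py_alt slot_index subcounts
instance (slot_index : Int) (subcounts : List (String × Int)) (out : String) : Decidable (Spec_resolve_band_c_subkind_py slot_index subcounts out) := by unfold Spec_resolve_band_c_subkind_py; infer_instance

-- ===== CLAIM (what is proved, stated in full; the proofs are below) =====
def Claim_equal_resolve_band_c_subkind_py : Prop := ∀ (slot_index : Int) (subcounts : List (String × Int)), Dom_resolve_band_c_subkind_py slot_index subcounts → Pre_resolve_band_c_subkind_py slot_index subcounts → Spec_resolve_band_c_subkind_py slot_index subcounts (resolve_band_c_subkind_py slot_index subcounts)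

-- ===== LEMMAS AND PROOFS =====

lemma pvBisect_stop (thr : List Int) (x : Int) (lo : Nat) : pvBisect thr x lo lo = lo := by
  rw [pvBisect]; simp

lemma pvBisect_one (a x : Int) : pvBisect [a] x 0 1 = if a ≤ x then 1 else 0 := by
  rw [pvBisect]; norm_num
  split_ifs <;> rw [pvBisect_stop]

lemma pvBisect_two01 (a b x : Int) : pvBisect [a, b] x 0 1 = if a ≤ x then 1 else 0 := by
  rw [pvBisect]; norm_num
  split_ifs <;> rw [pvBisect_stop]

lemma pvBisect_two (a b x : Int) :
    pvBisect [a, b] x 0 2 = if b ≤ x then 2 else if a ≤ x then 1 else 0 := by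
  rw [pvBisect]; norm_num
  split_ifs with h <;> simp [pvBisect_stop, pvBisect_two01, h] <;> omega

lemma pvBisect_three01 (a b c x : Int) : pvBisect [a, b, c] x 0 1 = if a ≤ x then 1 else 0 := by
  rw [pvBisect]; norm_num
  split_ifs <;> rw [pvBisect_stop]

lemma pvBisect_three23 (a b c x : Int) : pvBisect [a, b, c] x 2 3 = if c ≤ x then 3 else 2 := by
  rw [pvBisect]; norm_num
  split_ifs <;> rw [pvBisect_stop]

lemma pvBisect_three (a b c x : Int) :
    pvBisect [a, b, c] x 0 3 =
      if b ≤ x then (if c ≤ x then 3 else 2) else if a ≤ x then 1 else 0 := by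
  rw [pvBisect]; norm_num
  split_ifs with h <;> simp [pvBisect_three01, pvBisect_three23, h] <;> omega

-- ===== VERDICT (by name: the statement is the Claim_ definition above) =====
theorem resolve_band_c_subkind_py_spec : Claim_equal_resolve_band_c_subkind_py := by
  intro slot_index subcounts _ hpre
  obtain ⟨hp, hm, hu⟩ := hpre
  unfold Spec_resolve_band_c_subkind_py resolve_band_c_subkind_py resolve_band_c_subkind_py_alt
  simp only [pvALoop, pvBuildLoop]
  set p := PySem.Dict.getD (PySem.Dict.mk subcounts) "plus_dom" 0 with hpd
  set m := PySem.Dict.getD (PySem.Dict.mk subcounts) "minus_dom" 0 with hmd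
  set u := PySem.Dict.getD (PySem.Dict.mk subcounts) "mul_dom" 0 with hud
  clear_value p m u
  clear hpd hmd hud
  by_cases h1 : p = 0 <;> by_cases h2 : m = 0 <;> by_cases h3 : u = 0 <;>
    simp [h1, h2, h3] <;>
    simp only [pvBisect_one, pvBisect_two, pvBisect_three] <;>
    split_ifs <;>
    simp_all <;> omega
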